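-- pv_equiv track=rewrite | github.com/mababou9143094800/RechercheOP | transport.py | find_cycle_for_edge
-- ===== SOURCE A (Python) =====
-- from collections import defaultdict, deque
--
-- def _adj(basic_cells, n):
--     """Adjacency list for the bipartite graph.
--     Row i  ↔  node i ;  Column j  ↔  node n+j."""
--     g = defaultdict(list)
--     for (i, j) in basic_cells:
--         g[i].append(n + j)
--         g[n + j].append(i)
--     return g
--
-- def find_cycle_for_edge(basic_cells, i0, j0, n, m):
--     """Find the unique cycle created by adding (i0, j0) to the spanning tree.
--     Returns cycle cells with (i0, j0) first (the entering / '+' edge)."""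
--     g     = _adj(basic_cells, n)
--     start = i0
--     end   = n + j0
--
--     par = {start: None}
--     q   = deque([start])
--     while q:
--         u = q.popleft()
--         if u == end:
--             break
--         for vv in g[u]:
--             if vv not in par:
--                 par[vv] = u
--                 q.append(vv)
--
--     # Reconstruct path  start → end
--     path = []
--     nd   = end
--     while nd is not None:
--         path.append(nd)
--         nd = par.get(nd)
--     path.reverse()   # [start=i0, …, n+j0]
--
--     # Entering edge first (gets '+')
--     cycle = [(i0, j0)]
--     for k in range(len(path) - 1):
--         a, b = path[k], path[k + 1]
--         cycle.append((a, b - n) if a < n else (b, a - n))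
--     return cycle
-- ===== SOURCE B (Python) =====
-- from collections import deque
--
-- def find_cycle_for_edge(basic_cells, i0, j0, n, m):
--     """Find the unique cycle created by adding (i0, j0) to the spanning tree.
--     Returns cycle cells with (i0, j0) first (the entering / '+' edge)."""
--     g = {}
--     for (i, j) in basic_cells:
--         g.setdefault(i, []).append(n + j)
--         g.setdefault(n + j, []).append(i)
--
--     start, end = i0, n + j0
--
--     # BFS that carries whole paths in the queue: no parent map, no
--     # backward reconstruction -- the path is ready when end is dequeued.
--     queue = deque([(start, [start])])
--     visited = {start}
--     path = []
--     while queue: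
--         u, p = queue.popleft()
--         if u == end:
--             path = p
--             break
--         for v in g.get(u, ()):
--             if v not in visited:
--                 visited.add(v)
--                 queue.append((v, p + [v]))
--
--     return [(i0, j0)] + [(a, b - n) if a < n else (b, a - n)
--                          for a, b in zip(path, path[1:])]
-- ===== Notes on version B (the rewrite author's own statement) =====
-- stated objective: alternative
-- what changed: The parent-dict BFS plus backward path reconstruction is replaced by a BFS whose queue carries (node, path-so-far) pairs with a visited set, so the start-to-end path is ready the moment end is dequeued and the reconstruct/reverse phase disappears.
import Mathlib
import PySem

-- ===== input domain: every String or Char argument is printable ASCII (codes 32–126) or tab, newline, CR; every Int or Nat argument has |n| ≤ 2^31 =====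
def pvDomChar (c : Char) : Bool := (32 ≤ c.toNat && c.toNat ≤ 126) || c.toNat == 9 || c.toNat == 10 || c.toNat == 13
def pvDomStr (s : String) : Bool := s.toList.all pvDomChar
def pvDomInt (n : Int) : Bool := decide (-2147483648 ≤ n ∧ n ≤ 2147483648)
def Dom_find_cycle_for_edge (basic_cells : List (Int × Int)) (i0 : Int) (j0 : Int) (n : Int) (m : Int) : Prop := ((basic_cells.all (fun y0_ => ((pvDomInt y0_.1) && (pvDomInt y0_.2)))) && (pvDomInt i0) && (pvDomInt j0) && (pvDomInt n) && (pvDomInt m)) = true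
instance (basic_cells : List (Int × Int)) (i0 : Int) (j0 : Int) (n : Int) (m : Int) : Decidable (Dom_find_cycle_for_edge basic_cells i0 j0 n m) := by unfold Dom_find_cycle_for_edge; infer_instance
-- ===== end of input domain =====

-- B replaces A's parent-dict BFS + backward reconstruction by a BFS whose queue carries
-- (node, path-so-far) pairs, so the path is ready when `end` is dequeued (objective: alternative).

-- ===== PORT A =====
-- _adj: defaultdict(list); g[i].append(n+j); g[n+j].append(i)
def pvAdjA (basic_cells : List (Int × Int)) (n : Int) : PySem.Dict Int (List Int) :=
  basic_cells.foldl (fun g c =>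
    let g1 := g.insert c.1 (g.getD c.1 [] ++ [n + c.2])
    g1.insert (n + c.2) (g1.getD (n + c.2) [] ++ [c.1])) PySem.Dict.empty

-- the BFS while-loop of A: state = (par, q); fuel only totalizes (2*len(basic_cells)+2
-- exceeds the iteration count: each node is enqueued at most once)
def pvBfsA (g : PySem.Dict Int (List Int)) (endv : Int) :
    Nat → PySem.Dict Int (Option Int) → List Int → PySem.Dict Int (Option Int)
  | 0, par, _ => par
  | fuel + 1, par, q =>
    match q with
    | [] => par
    | u :: rest =>
      if u = endv then par
      else
        let s := (g.getD u []).foldl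
          (fun (s : PySem.Dict Int (Option Int) × List Int) vv =>
            if s.1.contains vv then s else (s.1.insert vv (some u), s.2 ++ [vv]))
          (par, rest)
        pvBfsA g endv fuel s.1 s.2

-- reconstruction loop: nd = end; while nd is not None: path.append(nd); nd = par.get(nd)
-- (par.get(nd) is None both for a missing key and a None value); fuel par.size+1 only
-- totalizes: the parent chain visits distinct keys of par
def pvReconA (par : PySem.Dict Int (Option Int)) : Nat → Int → List Int → List Int
  | 0, _, path => path
  | fuel + 1, nd, path =>
    let path' := path ++ [nd]
    match (par.get? nd).getD none with
    | none => path'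
    | some nd' => pvReconA par fuel nd' path'

def find_cycle_for_edge (basic_cells : List (Int × Int)) (i0 : Int) (j0 : Int) (n : Int) (m : Int) : List (Int × Int) :=
  let g := pvAdjA basic_cells n
  let start := i0
  let endv := n + j0
  let par := pvBfsA g endv (2 * basic_cells.length + 2) (PySem.Dict.empty.insert start none) [start]
  let path := (pvReconA par (par.size + 1) endv []).reverse
  -- for k in range(len(path)-1): cycle.append((a, b-n) if a < n else (b, a-n))
  (PySem.List.pyRange 0 (PySem.List.len path - 1) 1).foldl
    (fun cyc k =>
      let a := PySem.List.pyGetD path k 0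
      let b := PySem.List.pyGetD path (k + 1) 0
      cyc ++ [if a < n then (a, b - n) else (b, a - n)])
    [(i0, j0)]

-- ===== PORT B =====
-- g.setdefault(i, []).append(n+j)  =  g[i] = g.get(i, []) + [n+j]  (Dict.modify)
def pvAdjB (basic_cells : List (Int × Int)) (n : Int) : PySem.Dict Int (List Int) :=
  basic_cells.foldl (fun g c =>
    (g.modify c.1 [] (· ++ [n + c.2])).modify (n + c.2) [] (· ++ [c.1])) PySem.Dict.empty

-- BFS carrying (node, path) pairs; returns the path to endv, or [] if the queue empties
def pvBfsB (g : PySem.Dict Int (List Int)) (endv : Int) :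
    Nat → PySem.Set Int → List (Int × List Int) → List Int
  | 0, _, _ => []
  | fuel + 1, visited, q =>
    match q with
    | [] => []
    | (u, p) :: rest =>
      if u = endv then p
      else
        let s := (g.getD u []).foldl
          (fun (s : PySem.Set Int × List (Int × List Int)) v =>
            if s.1.contains v then s else (PySem.Set.add s.1 v, s.2 ++ [(v, p ++ [v])]))
          (visited, rest)
        pvBfsB g endv fuel s.1 s.2

def find_cycle_for_edge_alt (basic_cells : List (Int × Int)) (i0 : Int) (j0 : Int) (n : Int) (m : Int) : List (Int × Int) :=
  let g := pvAdjB basic_cells n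
  let start := i0
  let endv := n + j0
  let path := pvBfsB g endv (2 * basic_cells.length + 2) (PySem.Set.ofList [start]) [(start, [start])]
  (i0, j0) :: (path.zip (path.drop 1)).map
    (fun ab => if ab.1 < n then (ab.1, ab.2 - n) else (ab.2, ab.1 - n))

-- ===== PRECONDITION & SPEC =====
def Spec_find_cycle_for_edge (basic_cells : List (Int × Int)) (i0 : Int) (j0 : Int) (n : Int) (m : Int) (out : List (Int × Int)) : Prop := out = find_cycle_for_edge_alt basic_cells i0 j0 n m
instance (basic_cells : List (Int × Int)) (i0 : Int) (j0 : Int) (n : Int) (m : Int) (out : List (Int × Int)) : Decidable (Spec_find_cycle_for_edge basic_cells i0 j0 n m out) := by unfold Spec_find_cycle_for_edge; infer_instance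

-- ===== CLAIM (what is proved, stated in full; the proofs are below) =====
def Claim_equal_find_cycle_for_edge : Prop := ∀ (basic_cells : List (Int × Int)) (i0 : Int) (j0 : Int) (n : Int) (m : Int), Dom_find_cycle_for_edge basic_cells i0 j0 n m → Spec_find_cycle_for_edge basic_cells i0 j0 n m (find_cycle_for_edge basic_cells i0 j0 n m)

-- ===== LEMMAS AND PROOFS =====

-- `l` is a parent chain: l = [v, parent v, …, root], root's stored parent is none
def pvRevChain (par : PySem.Dict Int (Option Int)) : List Int → Prop
  | [] => False
  | [v] => par.get? v = some none
  | v :: w :: rest => par.get? v = some (some w) ∧ pvRevChain par (w :: rest)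

-- invariant tying one queue entry (u, p) of B to A's parent dict
def pvPathInv (par : PySem.Dict Int (Option Int)) (up : Int × List Int) : Prop :=
  up.2.Nodup ∧ (∀ x ∈ up.2, par.contains x = true) ∧
  pvRevChain par up.2.reverse ∧ up.2.reverse.head? = some up.1

-- joint state invariant of the two BFS loops
def pvStInv (endv : Int) (par : PySem.Dict Int (Option Int)) (visited : PySem.Set Int)
    (qA : List Int) (qB : List (Int × List Int)) : Prop :=
  par.keys.Nodup ∧
  (∀ x : Int, visited.contains x = par.contains x) ∧
  qA = qB.map Prod.fst ∧
  (∀ up ∈ qB, pvPathInv par up) ∧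
  (par.contains endv = true → endv ∈ qA)

-- number of candidate nodes not yet in par (fuel potential)
def pvMiss (K : List Int) (par : PySem.Dict Int (Option Int)) : Nat :=
  ((PySem.List.dedup K).filter (fun k => !(par.contains k))).length

lemma pvRecon_of_revchain (par : PySem.Dict Int (Option Int)) :
    ∀ (l : List Int) (v : Int) (acc : List Int) (fuel : Nat),
      pvRevChain par (v :: l) → l.length + 1 ≤ fuel →
      pvReconA par fuel v acc = acc ++ v :: l := by
  intro l
  induction l with
  | nil =>
    intro v acc fuel h hf
    match fuel, hf with
    | f + 1, _ =>
      simp only [pvRevChain] at h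
      simp [pvReconA, h]
  | cons w rest ih =>
    intro v acc fuel h hf
    match fuel, hf with
    | f + 1, hf =>
      obtain ⟨h1, h2⟩ := h
      simp only [pvReconA, h1, Option.getD_some]
      rw [ih w (acc ++ [v]) f h2 (by simp at hf ⊢; omega)]
      simp

lemma pvMiss_insert (K : List Int) (par : PySem.Dict Int (Option Int)) (v : Int) (w : Option Int)
    (hv : v ∈ K) (hc : par.contains v = false) :
    pvMiss K (par.insert v w) + 1 = pvMiss K par := by
  have aux : ∀ D : List Int, D.Nodup → v ∈ D →
      (D.filter (fun k => !((par.insert v w).contains k))).length + 1 =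
      (D.filter (fun k => !par.contains k)).length := by
    intro D
    induction D with
    | nil => simp
    | cons d D ih =>
      intro hnd hvm
      rcases List.nodup_cons.mp hnd with ⟨hdD, hndD⟩
      by_cases hdv : d = v
      · subst hdv
        have h1 : (par.insert d w).contains d = true := by
          simp [PySem.Dict.contains_insert_self]
        have h2 : ∀ k ∈ D, (!((par.insert d w).contains k)) = (!par.contains k) := by
          intro k hk
          have : k ≠ d := fun e => hdD (e ▸ hk)
          rw [PySem.Dict.contains_insert]
          simp [this]
        simp only [List.filter_cons, h1, hc, Bool.not_true, Bool.not_false]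
        rw [List.filter_congr h2]
        simp
      · have hvD : v ∈ D := by
          rcases List.mem_cons.mp hvm with h | h
          · exact absurd h.symm hdv
          · exact h
        have hd : (!((par.insert v w).contains d)) = (!par.contains d) := by
          rw [PySem.Dict.contains_insert]; simp [hdv]
        rw [List.filter_cons, List.filter_cons, hd]
        have := ih hndD hvD
        by_cases hcd : par.contains d = true
        · simp only [hcd, Bool.not_true]
          simpa using this
        · simp only [Bool.not_eq_true] at hcd
          simp only [hcd, Bool.not_false]
          simp only [if_true, List.length_cons]
          omega
  exact aux (PySem.List.dedup K) (PySem.List.nodup_dedup K) ((PySem.List.mem_dedup K v).mpr hv)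

lemma pvRevChain_insert (par : PySem.Dict Int (Option Int)) (v : Int) (w : Option Int)
    (hc : par.contains v = false) :
    ∀ l : List Int, pvRevChain par l → (∀ x ∈ l, par.contains x = true) →
      pvRevChain (par.insert v w) l := by
  intro l
  induction l with
  | nil => intro h; exact h.elim
  | cons x t ih =>
    intro h hm
    have hxv : x ≠ v := by
      intro e
      have := hm x (by simp)
      rw [e, hc] at this; exact Bool.false_ne_true this
    match t, h with
    | [], h =>
      simp only [pvRevChain] at h ⊢
      rw [PySem.Dict.get?_insert_of_ne _ _ hxv, h]
    | y :: t', ⟨h1, h2⟩ =>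
      refine ⟨?_, ih h2 (fun z hz => hm z (by simp [hz]))⟩
      rw [PySem.Dict.get?_insert_of_ne _ _ hxv, h1]

lemma pvPathInv_insert (par : PySem.Dict Int (Option Int)) (v : Int) (w : Option Int)
    (hc : par.contains v = false) (up : Int × List Int) (h : pvPathInv par up) :
    pvPathInv (par.insert v w) up := by
  obtain ⟨h1, h2, h3, h4⟩ := h
  refine ⟨h1, ?_, ?_, h4⟩
  · intro x hx
    rw [PySem.Dict.contains_insert]
    simp [h2 x hx]
  · exact pvRevChain_insert par v w hc _ h3 (fun x hx => h2 x (List.mem_reverse.mp hx))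

-- the inner `for vv in g[u]` loops of A and B advance in lockstep
lemma pvFold_inv (endv u : Int) (p : List Int) (K : List Int) :
    ∀ (l : List Int) (par : PySem.Dict Int (Option Int)) (visited : PySem.Set Int)
      (qA : List Int) (qB : List (Int × List Int)),
      (∀ v ∈ l, v ∈ K) →
      pvStInv endv par visited qA qB →
      pvPathInv par (u, p) →
      let sA := l.foldl (fun (s : PySem.Dict Int (Option Int) × List Int) vv =>
          if s.1.contains vv then s else (s.1.insert vv (some u), s.2 ++ [vv])) (par, qA)
      let sB := l.foldl (fun (s : PySem.Set Int × List (Int × List Int)) v =>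
          if s.1.contains v then s else (PySem.Set.add s.1 v, s.2 ++ [(v, p ++ [v])])) (visited, qB)
      pvStInv endv sA.1 sB.1 sA.2 sB.2 ∧ pvPathInv sA.1 (u, p) ∧
        sA.2.length + pvMiss K sA.1 = qA.length + pvMiss K par := by
  intro l
  induction l with
  | nil =>
    intro par visited qA qB _ hst hp
    exact ⟨hst, hp, rfl⟩
  | cons v l ih =>
    intro par visited qA qB hK hst hp
    obtain ⟨hnd, hvis, hmap, hq, hend⟩ := hst
    simp only [List.foldl_cons]
    by_cases hc : par.contains v = true
    · have hv : visited.contains v = true := by rw [hvis]; exact hc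
      simp only [hc, hv, if_true]
      exact ih par visited qA qB (fun w hw => hK w (by simp [hw]))
        ⟨hnd, hvis, hmap, hq, hend⟩ hp
    · simp only [Bool.not_eq_true] at hc
      have hv : visited.contains v = false := by rw [hvis]; exact hc
      simp only [hc, hv, Bool.false_eq_true, if_false]
      have hadd : PySem.Set.add visited v = visited ++ [v] := by
        unfold PySem.Set.add
        rw [show PySem.Set.contains visited v = visited.contains v from rfl, hv]
        simp
      have hvis' : ∀ x : Int, (PySem.Set.add visited v).contains x =
          (par.insert v (some u)).contains x := by
        intro x
        rw [hadd, PySem.Dict.contains_insert]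
        show (visited ++ [v]).contains x = _
        by_cases hxv : x = v
        · simp [hxv, List.contains_eq_mem]
        · have hb : (x == v) = false := by simp [hxv]
          have he : (visited ++ [v]).contains x = visited.contains x := by
            simp [List.contains_eq_mem, hxv]
          rw [he, hb, Bool.false_or, hvis x]
      -- v is fresh: not among p's nodes
      have hvp : v ∉ p := fun hvp => by
        have := hp.2.1 v hvp
        rw [hc] at this
        exact Bool.false_ne_true this
      have hrevp : p.reverse.head? = some u := hp.2.2.2
      obtain ⟨rest, hrest⟩ : ∃ rest, p.reverse = u :: rest := by
        cases hrev : p.reverse with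
        | nil => rw [hrev] at hrevp; simp at hrevp
        | cons a b => rw [hrev] at hrevp; simp at hrevp; exact ⟨b, by rw [hrevp]⟩
      have hpinv' : pvPathInv (par.insert v (some u)) (v, p ++ [v]) := by
        refine ⟨?_, ?_, ?_, ?_⟩
        · rw [List.nodup_append]
          refine ⟨hp.1, List.nodup_singleton v, ?_⟩
          intro a ha b hb
          rw [List.mem_singleton.mp hb]
          exact fun e => hvp (e ▸ ha)
        · intro x hx
          rcases List.mem_append.mp hx with h | h
          · rw [PySem.Dict.contains_insert]
            simp [hp.2.1 x h]
          · rw [List.mem_singleton.mp h, PySem.Dict.contains_insert]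
            simp
        · show pvRevChain _ (p ++ [v]).reverse
          rw [List.reverse_append, List.reverse_singleton, List.singleton_append, hrest]
          refine ⟨PySem.Dict.get?_insert_self par v (some u), ?_⟩
          rw [← hrest]
          exact pvRevChain_insert par v (some u) (by rw [hc]) p.reverse hp.2.2.1
            (fun x hx => hp.2.1 x (List.mem_reverse.mp hx))
        · show (p ++ [v]).reverse.head? = some v
          rw [List.reverse_append]
          simp
      have hst' : pvStInv endv (par.insert v (some u)) (PySem.Set.add visited v)
          (qA ++ [v]) (qB ++ [(v, p ++ [v])]) := by
        refine ⟨PySem.Dict.nodup_keys_insert par v (some u) hnd, hvis', ?_, ?_, ?_⟩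
        · simp [hmap]
        · intro up hup
          rcases List.mem_append.mp hup with h | h
          · exact pvPathInv_insert par v (some u) (by rw [hc]) up (hq up h)
          · rw [List.mem_singleton.mp h]
            exact hpinv'
        · intro hce
          rw [PySem.Dict.contains_insert] at hce
          rcases Bool.or_eq_true_iff.mp hce with h | h
          · rw [List.mem_append, List.mem_singleton]
            right; exact beq_iff_eq.mp h
          · exact List.mem_append.mpr (Or.inl (hend h))
      have hmiss := pvMiss_insert K par v (some u) (hK v (by simp)) (by rw [hc])
      have hres := ih (par.insert v (some u)) (PySem.Set.add visited v)
        (qA ++ [v]) (qB ++ [(v, p ++ [v])]) (fun w hw => hK w (by simp [hw])) hst'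
        (pvPathInv_insert par v (some u) (by rw [hc]) (u, p) hp)
      refine ⟨hres.1, hres.2.1, ?_⟩
      rw [hres.2.2]
      simp only [List.length_append, List.length_singleton]
      omega

-- the two BFS loops: A's final parent dict reconstructs exactly B's returned path
lemma pvBfs_equiv (g : PySem.Dict Int (List Int)) (endv : Int) (K : List Int)
    (hg : ∀ u v, v ∈ g.getD u [] → v ∈ K) :
    ∀ (fuel : Nat) (par : PySem.Dict Int (Option Int)) (visited : PySem.Set Int)
      (qA : List Int) (qB : List (Int × List Int)),
      pvStInv endv par visited qA qB →
      qA.length + pvMiss K par ≤ fuel →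
      (pvBfsA g endv fuel par qA).keys.Nodup ∧
      ((pvBfsB g endv fuel visited qB = [] ∧ (pvBfsA g endv fuel par qA).contains endv = false) ∨
       (pvPathInv (pvBfsA g endv fuel par qA) (endv, pvBfsB g endv fuel visited qB))) := by
  intro fuel
  induction fuel with
  | zero =>
    intro par visited qA qB hst hf
    obtain ⟨hnd, hvis, hmap, hq, hend⟩ := hst
    have hqA : qA = [] := by
      cases qA with
      | nil => rfl
      | cons a l => simp at hf
    subst hqA
    refine ⟨hnd, Or.inl ⟨rfl, ?_⟩⟩
    cases h : par.contains endv with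
    | false => exact h
    | true => exact absurd (hend h) (List.not_mem_nil)
  | succ f ih =>
    intro par visited qA qB hst hf
    obtain ⟨hnd, hvis, hmap, hq, hend⟩ := hst
    cases qB with
    | nil =>
      have hqA : qA = [] := by simpa using hmap
      subst hqA
      have ea : pvBfsA g endv (f + 1) par [] = par := rfl
      have eb : pvBfsB g endv (f + 1) visited [] = [] := rfl
      rw [ea, eb]
      refine ⟨hnd, Or.inl ⟨rfl, ?_⟩⟩
      cases h : par.contains endv with
      | false => rfl
      | true => exact absurd (hend h) (List.not_mem_nil)
    | cons up rest =>
      obtain ⟨u, p⟩ := up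
      have hqA : qA = u :: rest.map Prod.fst := by simpa using hmap
      subst hqA
      by_cases hu : u = endv
      · have ea : pvBfsA g endv (f + 1) par (u :: rest.map Prod.fst) = par := by
          simp [pvBfsA, hu]
        have eb : pvBfsB g endv (f + 1) visited ((u, p) :: rest) = p := by
          simp [pvBfsB, hu]
        rw [ea, eb]
        refine ⟨hnd, Or.inr ?_⟩
        have := hq (u, p) (by simp)
        rwa [hu] at this
      · have hst' : pvStInv endv par visited (rest.map Prod.fst) rest :=
          ⟨hnd, hvis, rfl, fun w hw => hq w (by simp [hw]), fun h => by
            rcases List.mem_cons.mp (hend h) with h' | h'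
            · exact absurd h'.symm hu
            · exact h'⟩
        have hfold := pvFold_inv endv u p K (g.getD u []) par visited
          (rest.map Prod.fst) rest (fun v hv => hg u v hv) hst' (hq (u, p) (by simp))
        have ea : pvBfsA g endv (f + 1) par (u :: rest.map Prod.fst) =
            pvBfsA g endv f
              ((g.getD u []).foldl (fun (s : PySem.Dict Int (Option Int) × List Int) vv =>
                if s.1.contains vv then s else (s.1.insert vv (some u), s.2 ++ [vv]))
                (par, rest.map Prod.fst)).1
              ((g.getD u []).foldl (fun (s : PySem.Dict Int (Option Int) × List Int) vv =>
                if s.1.contains vv then s else (s.1.insert vv (some u), s.2 ++ [vv]))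
                (par, rest.map Prod.fst)).2 := by
          simp [pvBfsA, hu]
        have eb : pvBfsB g endv (f + 1) visited ((u, p) :: rest) =
            pvBfsB g endv f
              ((g.getD u []).foldl (fun (s : PySem.Set Int × List (Int × List Int)) v =>
                if s.1.contains v then s else (PySem.Set.add s.1 v, s.2 ++ [(v, p ++ [v])]))
                (visited, rest)).1
              ((g.getD u []).foldl (fun (s : PySem.Set Int × List (Int × List Int)) v =>
                if s.1.contains v then s else (PySem.Set.add s.1 v, s.2 ++ [(v, p ++ [v])]))
                (visited, rest)).2 := by
          simp [pvBfsB, hu]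
        rw [ea, eb]
        apply ih _ _ _ _ hfold.1
        have hlen := hfold.2.2
        simp only [List.length_cons] at hf
        omega

-- values stored in A's adjacency dict all come from the cells
lemma pvAdjA_values (basic_cells : List (Int × Int)) (n : Int) :
    ∀ u v, v ∈ (pvAdjA basic_cells n).getD u [] →
      v ∈ basic_cells.flatMap (fun c => [c.1, n + c.2]) := by
  have aux : ∀ (l : List (Int × Int)) (g0 : PySem.Dict Int (List Int)),
      (∀ u v, v ∈ g0.getD u [] → v ∈ basic_cells.flatMap (fun c => [c.1, n + c.2])) →
      (∀ c ∈ l, c.1 ∈ basic_cells.flatMap (fun c => [c.1, n + c.2]) ∧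
                n + c.2 ∈ basic_cells.flatMap (fun c => [c.1, n + c.2])) →
      ∀ u v, v ∈ (l.foldl (fun g c =>
          let g1 := g.insert c.1 (g.getD c.1 [] ++ [n + c.2])
          g1.insert (n + c.2) (g1.getD (n + c.2) [] ++ [c.1])) g0).getD u [] →
        v ∈ basic_cells.flatMap (fun c => [c.1, n + c.2]) := by
    intro l
    induction l with
    | nil => intro g0 hg _ u v hv; exact hg u v hv
    | cons c t ih =>
      intro g0 hg hl
      simp only [List.foldl_cons]
      apply ih
      · intro u v hv
        rcases hl c (by simp) with ⟨hc1, hc2⟩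
        have step : ∀ (L : List Int) (y : Int),
            (∀ x, x ∈ L → x ∈ basic_cells.flatMap (fun c => [c.1, n + c.2])) →
            y ∈ basic_cells.flatMap (fun c => [c.1, n + c.2]) →
            ∀ x, x ∈ L ++ [y] → x ∈ basic_cells.flatMap (fun c => [c.1, n + c.2]) := by
          intro L y hL hy x hx
          rcases List.mem_append.mp hx with h | h
          · exact hL x h
          · rw [List.mem_singleton.mp h]; exact hy
        simp only [PySem.Dict.getD_insert] at hv
        split_ifs at hv with e1 e2 e3
        · exact step _ _ (step _ _ (fun x hx => hg _ _ hx) hc2) hc1 v hv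
        · exact step _ _ (fun x hx => hg _ _ hx) hc1 v hv
        · exact step _ _ (fun x hx => hg _ _ hx) hc2 v hv
        · exact hg _ _ hv
      · intro c' hc'
        exact hl c' (by simp [hc'])
  apply aux basic_cells PySem.Dict.empty
  · intro u v hv
    simp [PySem.Dict.getD_empty] at hv
  · intro c hc
    constructor
    · exact List.mem_flatMap.mpr ⟨c, hc, by simp⟩
    · exact List.mem_flatMap.mpr ⟨c, hc, by simp⟩

lemma pvAdjB_eq_pvAdjA (basic_cells : List (Int × Int)) (n : Int) :
    pvAdjB basic_cells n = pvAdjA basic_cells n := rfl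

lemma pvDedup_length_le (xs : List Int) : (PySem.List.dedup xs).length ≤ xs.length := by
  have aux : ∀ (l s : List Int), (l.foldl PySem.Set.add s).length ≤ s.length + l.length := by
    intro l
    induction l with
    | nil => simp
    | cons x t ih =>
      intro s
      have h1 : (PySem.Set.add s x).length ≤ s.length + 1 := by
        unfold PySem.Set.add; split <;> simp
      have h2 := ih (PySem.Set.add s x)
      simp only [List.foldl_cons, List.length_cons]
      omega
  have : PySem.List.dedup xs = xs.foldl PySem.Set.add [] := by
    rw [PySem.List.dedup_eq_ofList, PySem.Set.ofList_eq_foldl]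
  rw [this]
  simpa using aux xs []

-- A's cell-building loop over indices equals B's zip/map form, on any path list
lemma pvCycle_eq (p : List Int) (i0 j0 nn : Int) :
    (PySem.List.pyRange 0 (PySem.List.len p - 1) 1).foldl
      (fun cyc k =>
        let a := PySem.List.pyGetD p k 0
        let b := PySem.List.pyGetD p (k + 1) 0
        cyc ++ [if a < nn then (a, b - nn) else (b, a - nn)])
      [(i0, j0)] =
    (i0, j0) :: (p.zip (p.drop 1)).map
      (fun ab => if ab.1 < nn then (ab.1, ab.2 - nn) else (ab.2, ab.1 - nn)) := by
  cases p with
  | nil =>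
    show List.foldl _ [(i0, j0)] (PySem.List.pyRange 0 (PySem.List.len ([] : List Int) - 1) 1) = _
    have : PySem.List.pyRange 0 (PySem.List.len ([] : List Int) - 1) 1 = [] := rfl
    rw [this]
    rfl
  | cons x t =>
    rw [show (fun (cyc : List (Int × Int)) (k : Int) =>
        let a := PySem.List.pyGetD (x :: t) k 0
        let b := PySem.List.pyGetD (x :: t) (k + 1) 0
        cyc ++ [if a < nn then (a, b - nn) else (b, a - nn)]) =
      (fun cyc k => cyc ++ [(fun k =>
        if PySem.List.pyGetD (x :: t) k 0 < nn
        then (PySem.List.pyGetD (x :: t) k 0, PySem.List.pyGetD (x :: t) (k + 1) 0 - nn)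
        else (PySem.List.pyGetD (x :: t) (k + 1) 0, PySem.List.pyGetD (x :: t) k 0 - nn)) k]) from rfl,
      PySem.List.foldl_append_singleton_eq_map]
    have hlen : PySem.List.len (x :: t) - 1 = (t.length : Int) := by
      simp [PySem.List.len_eq]
    rw [hlen, PySem.List.pyRange_zero_natCast, List.map_map, List.singleton_append]
    congr 1
    apply List.ext_getElem
    · simp [List.length_zip]
    · intro k h1 h2
      simp only [List.getElem_map, List.getElem_range, Function.comp_apply, List.getElem_zip]
      have hk : k < t.length := by simpa using h1
      have hk1 : k < (x :: t).length := by simp; omega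
      have hk2 : k + 1 < (x :: t).length := by simp; omega
      have e1 : PySem.List.pyGetD (x :: t) ((k : Int)) 0 = (x :: t)[k]'hk1 := by
        rw [PySem.List.pyGetD_natCast]
        exact List.getD_eq_getElem _ _ (by simp; omega)
      have e2 : PySem.List.pyGetD (x :: t) ((k : Int) + 1) 0 = (x :: t)[k + 1]'hk2 := by
        rw [show ((k : Int) + 1) = ((k + 1 : Nat) : Int) by push_cast; ring,
          PySem.List.pyGetD_natCast]
        exact List.getD_eq_getElem _ _ (by simp; omega)
      have e3 : ((x :: t).drop 1)[k]'(by simpa using hk) = (x :: t)[k + 1]'hk2 := by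
        simp
      rw [e1, e2, e3]

-- ===== VERDICT (by name: the statement is the Claim_ definition above) =====
-- final path facts extracted once
theorem find_cycle_for_edge_spec : Claim_equal_find_cycle_for_edge := by
  intro bc i0 j0 n m _
  unfold Spec_find_cycle_for_edge
  simp only [find_cycle_for_edge, find_cycle_for_edge_alt, pvAdjB_eq_pvAdjA]
  set g := pvAdjA bc n with hgdef
  set K : List Int := bc.flatMap (fun c => [c.1, n + c.2]) with hKdef
  set endv := n + j0 with hedef
  set par0 := PySem.Dict.empty.insert i0 none with hpar0
  -- initial joint invariant
  have hst : pvStInv endv par0 (PySem.Set.ofList [i0]) [i0] [(i0, [i0])] := by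
    refine ⟨?_, ?_, rfl, ?_, ?_⟩
    · exact PySem.Dict.nodup_keys_insert _ _ _ PySem.Dict.nodup_keys_empty
    · intro x
      show ([i0] : List Int).contains x = _
      rw [hpar0, PySem.Dict.contains_insert]
      simp only [List.contains_eq_mem, PySem.Dict.contains_empty, Bool.or_false,
        List.mem_singleton]
      by_cases hx : x = i0 <;> simp [hx]
    · intro up hup
      rw [List.mem_singleton.mp hup]
      refine ⟨List.nodup_singleton _, ?_, ?_, rfl⟩
      · intro x hx
        rw [List.mem_singleton.mp hx, hpar0]
        exact PySem.Dict.contains_insert_self _ _ _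
      · show pvRevChain _ [i0]
        rw [hpar0]
        exact PySem.Dict.get?_insert_self _ _ _
    · intro h
      rw [hpar0, PySem.Dict.contains_insert] at h
      simp only [PySem.Dict.contains_empty, Bool.or_false, beq_iff_eq] at h
      simp [h]
  have hfuel : ([i0] : List Int).length + pvMiss K par0 ≤ 2 * bc.length + 2 := by
    have h1 : pvMiss K par0 ≤ (PySem.List.dedup K).length := List.length_filter_le _ _
    have h2 := pvDedup_length_le K
    have haux : ∀ l : List (Int × Int), (l.flatMap (fun c => [c.1, n + c.2])).length = 2 * l.length := by
      intro l
      induction l with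
      | nil => simp
      | cons c tl ih => simp [ih]; omega
    have h3 : K.length = 2 * bc.length := haux bc
    simp only [List.length_singleton]
    omega
  obtain ⟨hndF, hres⟩ := pvBfs_equiv g endv K (pvAdjA_values bc n) (2 * bc.length + 2)
    par0 (PySem.Set.ofList [i0]) [i0] [(i0, [i0])] hst hfuel
  set parF := pvBfsA g endv (2 * bc.length + 2) par0 [i0] with hparF
  set resB := pvBfsB g endv (2 * bc.length + 2) (PySem.Set.ofList [i0]) [(i0, [i0])] with hresB
  rcases hres with ⟨hB, hcF⟩ | hinv
  · -- end never reached: A reconstructs [endv], both produce [(i0, j0)]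
    rw [hB]
    have hget : (parF.get? endv) = none := (PySem.Dict.get?_eq_none_iff_contains _ _).mpr hcF
    have hre : pvReconA parF (parF.size + 1) endv [] = [endv] := by
      simp [pvReconA, hget]
    rw [hre]
    rw [show ([endv] : List Int).reverse = [endv] from rfl, pvCycle_eq [endv] i0 j0 n]
    simp
  · -- end dequeued: A's reconstruction from parF is exactly resB
    obtain ⟨hndB, hmem, hchain, hhead⟩ := hinv
    simp only at hndB hmem hchain hhead
    obtain ⟨tl, htl⟩ : ∃ tl, resB.reverse = endv :: tl := by
      cases hrev : resB.reverse with
      | nil => rw [hrev] at hhead; simp at hhead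
      | cons a b =>
        rw [hrev] at hhead
        simp only [List.head?_cons, Option.some_inj] at hhead
        exact ⟨b, by rw [hhead]⟩
    have hlenB : resB.length ≤ parF.size := by
      have hsub : resB ⊆ parF.keys := fun x hx =>
        (PySem.Dict.contains_iff_mem_keys _ _).mp (hmem x hx)
      have := (List.subperm_of_subset hndB hsub).length_le
      have hks : parF.keys.length = parF.size := by
        show (parF.items.map Prod.fst).length = parF.items.length
        simp
      omega
    have hre : pvReconA parF (parF.size + 1) endv [] = resB.reverse := by
      rw [htl]
      have hchain' : pvRevChain parF (endv :: tl) := by rwa [htl] at hchain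
      have hlt : tl.length + 1 ≤ parF.size + 1 := by
        have : resB.reverse.length = tl.length + 1 := by rw [htl]; simp
        simp only [List.length_reverse] at this
        omega
      exact pvRecon_of_revchain parF tl endv [] (parF.size + 1) hchain' hlt
    rw [hre, List.reverse_reverse, pvCycle_eq resB i0 j0 n]
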